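-- pv_equiv track=rewrite | github.com/seansio1995/codefights | longestWord.py | longestWord
-- ===== SOURCE A (Python) =====
-- def longestWord(text):
--     maxLen=0
--     word=""
--     for i in range(len(text)):
--         if not text[i].isalpha():
--             if len(word)>maxLen:
--                 maxLen=len(word)
--                 longWord=word
--             word=""
--         else:
--             word+=text[i]
--     if len(word)>maxLen:
--         longWord=word
--     return longWord
-- ===== SOURCE B (Python) =====
-- def _words(text):
--     words = []
--     cur = ""
--     for ch in text:
--         if ch.isalpha():
--             cur += ch
--         elif cur:
--             words.append(cur)
--             cur = ""
--     if cur: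
--         words.append(cur)
--     return words
--
--
-- def longestWord(text):
--     # max with key=len returns the FIRST longest word, matching A's strict '>' update
--     return max(_words(text), key=len)
-- ===== Notes on version B (the rewrite author's own statement) =====
-- stated objective: idiomatic
-- what changed: Tokenize the text into its maximal alphabetic runs first, then pick the longest with max(words, key=len), instead of A's single fused loop carrying maxLen/word/longWord state.
import Mathlib
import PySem

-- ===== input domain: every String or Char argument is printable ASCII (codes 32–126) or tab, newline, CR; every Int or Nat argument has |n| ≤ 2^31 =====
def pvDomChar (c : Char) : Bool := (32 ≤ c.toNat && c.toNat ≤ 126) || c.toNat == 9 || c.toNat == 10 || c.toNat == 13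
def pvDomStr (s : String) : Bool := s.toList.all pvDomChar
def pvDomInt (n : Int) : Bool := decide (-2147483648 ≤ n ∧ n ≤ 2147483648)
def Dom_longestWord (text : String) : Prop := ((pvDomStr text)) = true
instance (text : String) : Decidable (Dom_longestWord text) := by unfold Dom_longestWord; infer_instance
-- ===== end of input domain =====

-- B tokenizes the text into its maximal alphabetic runs and returns max(words, key=len),
-- instead of A's fused loop carrying maxLen/word/longWord; same cost, more idiomatic.


-- ===== PORT A =====
-- state = (maxLen, word, longWord); longWord = none models Python's unassigned variable
def pvAstep (s : Int × List Char × Option (List Char)) (c : Char) :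
    Int × List Char × Option (List Char) :=
  if !(PySem.Chars.isalpha c) then
    if (s.2.1.length : Int) > s.1 then ((s.2.1.length : Int), [], some s.2.1)
    else (s.1, [], s.2.2)
  else (s.1, s.2.1 ++ [c], s.2.2)

def longestWord (text : String) : String :=
  let st := text.toList.foldl pvAstep (0, [], none)
  if (st.2.1.length : Int) > st.1 then String.ofList st.2.1
  else String.ofList (st.2.2.getD [])   -- getD []: unassigned longWord (UnboundLocalError), excluded by Pre_

-- ===== PORT B =====
-- key=len on a word ported as List Char: its length as a Python int
def pvKey (w : List Char) : Int := (w.length : Int)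

-- _words: one pass collecting the maximal alphabetic runs (strings ported as List Char)
def pvWstep (s : List (List Char) × List Char) (c : Char) : List (List Char) × List Char :=
  if PySem.Chars.isalpha c then (s.1, s.2 ++ [c])
  else if s.2 ≠ [] then (s.1 ++ [s.2], [])
  else (s.1, s.2)

def pvWords (text : String) : List (List Char) :=
  let st := text.toList.foldl pvWstep ([], [])
  if st.2 ≠ [] then st.1 ++ [st.2] else st.1

-- max(words, key=len); none = ValueError on empty words, excluded by Pre_
def longestWord_alt (text : String) : String :=
  match PySem.List.max? (pvWords text) pvKey with
  | some w => String.ofList w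
  | none => ""

-- ===== PRECONDITION & SPEC =====
-- Pre_ excludes texts with no alphabetic character: there A raises UnboundLocalError
-- (longWord is never assigned) and B raises ValueError (max of empty sequence).
def Pre_longestWord (text : String) : Prop :=
  (text.toList.any PySem.Chars.isalpha) = true
instance (text : String) : Decidable (Pre_longestWord text) := by
  unfold Pre_longestWord; infer_instance

def pvWitness_longestWord : String := "hello big world"

def Spec_longestWord (text : String) (out : String) : Prop := out = longestWord_alt text
instance (text : String) (out : String) : Decidable (Spec_longestWord text out) := by
  unfold Spec_longestWord; infer_instance

-- ===== CLAIM (what is proved, stated in full; the proofs are below) =====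
def Claim_equal_longestWord : Prop :=
  ∀ (text : String), Dom_longestWord text → Pre_longestWord text →
    Spec_longestWord text (longestWord text)

-- ===== LEMMAS AND PROOFS =====

lemma pv_elim_nonneg (o : Option (List Char)) : 0 ≤ o.elim 0 pvKey := by
  cases o <;> simp [pvKey]

lemma pv_max_append_none {ws : List (List Char)} (w : List Char)
    (h : PySem.List.max? ws pvKey = none) :
    PySem.List.max? (ws ++ [w]) pvKey = some w := by
  simp only [PySem.List.max?] at h ⊢
  simp [List.foldl_append, h]

lemma pv_max_append_some {ws : List (List Char)} {m : List Char} (w : List Char)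
    (h : PySem.List.max? ws pvKey = some m) :
    PySem.List.max? (ws ++ [w]) pvKey
      = if pvKey m < pvKey w then some w else some m := by
  simp only [PySem.List.max?] at h ⊢
  simp [List.foldl_append, h]

-- one fused step of A, expressed on B's (words, current run) state
lemma pv_step (ws : List (List Char)) (cur : List Char) (c : Char) :
    pvAstep ((PySem.List.max? ws pvKey).elim 0 pvKey, cur, PySem.List.max? ws pvKey) c
      = ((PySem.List.max? (pvWstep (ws, cur) c).1 pvKey).elim 0 pvKey,
         (pvWstep (ws, cur) c).2,
         PySem.List.max? (pvWstep (ws, cur) c).1 pvKey) := by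
  by_cases ha : PySem.Chars.isalpha c
  · simp [pvAstep, pvWstep, ha]
  · by_cases hc : cur = []
    · subst hc
      have hnn : ¬ (0 : Int) > (PySem.List.max? ws pvKey).elim 0 pvKey := by
        have := pv_elim_nonneg (PySem.List.max? ws pvKey); omega
      simp [pvAstep, pvWstep, ha, hnn]
    · have hlen : 0 < cur.length := List.length_pos_of_ne_nil hc
      cases hm : PySem.List.max? ws pvKey with
      | none =>
        have hws : ws = [] := (PySem.List.max?_eq_none_iff ws pvKey).mp hm
        have hgt : ((cur.length : Int)) > (0 : Int) := by omega
        subst hws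
        simp [pvAstep, pvWstep, ha, hc, PySem.List.max?, pvKey]
      | some m =>
        by_cases hlt : pvKey m < pvKey cur
        · have hlt' : (m.length : Int) < (cur.length : Int) := by simpa [pvKey] using hlt
          simp [pvAstep, pvWstep, ha, hc, pv_max_append_some cur hm, pvKey, hlt']
        · have hlt' : ¬ (m.length : Int) < (cur.length : Int) := by simpa [pvKey] using hlt
          simp [pvAstep, pvWstep, ha, hc, pv_max_append_some cur hm, pvKey, hlt']

-- loop invariant: A's fused state is determined by B's (words, current run) state
lemma pv_inv (cs : List Char) :
    cs.foldl pvAstep (0, [], none)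
      = ((PySem.List.max? (cs.foldl pvWstep ([], [])).1 pvKey).elim 0 pvKey,
         (cs.foldl pvWstep ([], [])).2,
         PySem.List.max? (cs.foldl pvWstep ([], [])).1 pvKey) := by
  induction cs using List.reverseRecOn with
  | nil => simp [PySem.List.max?]
  | append_singleton cs c ih =>
    simp only [List.foldl_append, List.foldl_cons, List.foldl_nil, ih]
    rw [pv_step]

-- ===== VERDICT (by name: the statement is the Claim_ definition above) =====
theorem longestWord_spec : Claim_equal_longestWord := by
  intro text _ _
  show longestWord text = longestWord_alt text
  unfold longestWord longestWord_alt pvWords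
  rw [pv_inv text.toList]
  by_cases hc : (text.toList.foldl pvWstep ([], [])).2 = []
  · have hnn : ¬ ((text.toList.foldl pvWstep ([], [])).2.length : Int)
        > (PySem.List.max? (text.toList.foldl pvWstep ([], [])).1 pvKey).elim 0 pvKey := by
      rw [hc]
      have := pv_elim_nonneg (PySem.List.max? (text.toList.foldl pvWstep ([], [])).1 pvKey)
      simp; omega
    rw [if_neg hnn]
    simp only [hc, ne_eq, not_true_eq_false, if_false]
    cases hm : PySem.List.max? (text.toList.foldl pvWstep ([], [])).1 pvKey with
    | none => simp
    | some m => simp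
  · simp only [hc, ne_eq, not_false_eq_true, if_true]
    cases hm : PySem.List.max? (text.toList.foldl pvWstep ([], [])).1 pvKey with
    | none =>
      rw [pv_max_append_none _ hm]
      simp [List.length_pos_of_ne_nil hc]
    | some m =>
      rw [pv_max_append_some _ hm]
      by_cases hlt : pvKey m < pvKey (text.toList.foldl pvWstep ([], [])).2
      · have hgt : ((text.toList.foldl pvWstep ([], [])).2.length : Int)
            > (Option.some m).elim 0 pvKey := by simpa [pvKey] using hlt
        rw [if_pos hgt, if_pos hlt]
      · have hgt : ¬ ((text.toList.foldl pvWstep ([], [])).2.length : Int)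
            > (Option.some m).elim 0 pvKey := by simpa [pvKey] using hlt
        rw [if_neg hgt, if_neg hlt]; rfl
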